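-- pv_equiv track=rewrite | github.com/ali-jin/holbertonschool-Markdown2HTML | markdown2html.py | markdown_ol_to_html
-- ===== SOURCE A (Python) =====
-- def markdown_ol_to_html(lines):
--     lines_list = []
--     is_present = False
--
--     for line in lines:
--         if line.startswith('* '):
--             converted_line = f'<li>{line[2:].strip()}</li>\n'
--             if is_present is False:
--                 lines_list.append('<ol>\n')
--                 is_present = True
--             lines_list.append(converted_line)
--         else:
--             if is_present is True:
--                 lines_list.append('</ol>\n')
--                 is_present = False
--             lines_list.append(line)
--     if is_present is True:
--         lines_list.append('</ol>\n')
--     return lines_list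
-- ===== SOURCE B (Python) =====
-- def markdown_ol_to_html(lines):
--     # Run-based decomposition: scan by maximal runs of '* ' lines, no state flag.
--     out = []
--     i = 0
--     n = len(lines)
--     while i < n:
--         if lines[i].startswith('* '):
--             out.append('<ol>\n')
--             while i < n and lines[i].startswith('* '):
--                 out.append(f'<li>{lines[i][2:].strip()}</li>\n')
--                 i += 1
--             out.append('</ol>\n')
--         else:
--             out.append(lines[i])
--             i += 1
--     return out
-- ===== Notes on version B (the rewrite author's own statement) =====
-- stated objective: alternative
-- what changed: Replaced the boolean open/close state flag with a run-based scan: each maximal run of '* ' lines is consumed by an inner loop and wrapped in <ol>/</ol> at its boundaries, so no flag is carried across iterations.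
import Mathlib
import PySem

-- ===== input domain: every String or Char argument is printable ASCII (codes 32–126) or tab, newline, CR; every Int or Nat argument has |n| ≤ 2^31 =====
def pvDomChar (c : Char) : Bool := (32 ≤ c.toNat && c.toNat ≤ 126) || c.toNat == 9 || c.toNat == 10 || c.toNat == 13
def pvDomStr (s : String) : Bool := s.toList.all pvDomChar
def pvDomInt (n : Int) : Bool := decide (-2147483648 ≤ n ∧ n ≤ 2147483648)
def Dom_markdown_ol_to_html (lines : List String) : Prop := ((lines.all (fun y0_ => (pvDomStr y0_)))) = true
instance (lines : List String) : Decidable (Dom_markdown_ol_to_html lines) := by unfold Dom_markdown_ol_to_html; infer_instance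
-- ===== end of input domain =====

-- B replaces A's carried open/close boolean flag by a run-based scan over maximal runs of '* ' lines; return values are proved equal on all inputs.

-- shared by both ports: 'line.startswith("* ")' and the f-string conversion of one list line
def pvIsItem (l : String) : Bool := PySem.Str.startswith l "* "
def pvConv (l : String) : String :=
  "<li>" ++ PySem.Str.strip (PySem.Str.slice l (some 2) none) ++ "</li>\n"

-- ===== PORT A =====
-- A's loop: accumulator list plus the is_present flag, carried through every line
def pvGoA (ls : List String) (acc : List String) (isPresent : Bool) : List String :=
  match ls with
  | [] => if isPresent then acc ++ ["</ol>\n"] else acc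
  | l :: rest =>
    if pvIsItem l then
      if isPresent then pvGoA rest (acc ++ [pvConv l]) true
      else pvGoA rest (acc ++ ["<ol>\n", pvConv l]) true
    else
      if isPresent then pvGoA rest (acc ++ ["</ol>\n", l]) false
      else pvGoA rest (acc ++ [l]) false

def markdown_ol_to_html (lines : List String) : List String := pvGoA lines [] false

-- ===== PORT B =====
-- B's outer while-loop: the inner while consumes one maximal run of '* ' lines (takeWhile/dropWhile)
def markdown_ol_to_html_alt (lines : List String) : List String :=
  match lines with
  | [] => []
  | l :: rest =>
    if pvIsItem l then
      "<ol>\n" :: ((pvConv l :: (rest.takeWhile pvIsItem).map pvConv) ++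
        "</ol>\n" :: markdown_ol_to_html_alt (rest.dropWhile pvIsItem))
    else l :: markdown_ol_to_html_alt rest
termination_by lines.length
decreasing_by
  · simpa using Nat.lt_succ_of_le (List.length_dropWhile_le pvIsItem rest)
  · simp

-- ===== PRECONDITION & SPEC =====
def Spec_markdown_ol_to_html (lines : List String) (out : List String) : Prop := out = markdown_ol_to_html_alt lines
instance (lines : List String) (out : List String) : Decidable (Spec_markdown_ol_to_html lines out) := by unfold Spec_markdown_ol_to_html; infer_instance

-- ===== CLAIM (what is proved, stated in full; the proofs are below) =====
def Claim_equal_markdown_ol_to_html : Prop := ∀ (lines : List String), Dom_markdown_ol_to_html lines → Spec_markdown_ol_to_html lines (markdown_ol_to_html lines)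

-- ===== LEMMAS AND PROOFS =====

-- Invariant of A's loop, for both flag values at once
theorem pvGoA_char (ls : List String) :
    (∀ acc, pvGoA ls acc false = acc ++ markdown_ol_to_html_alt ls) ∧
    (∀ acc, pvGoA ls acc true =
      acc ++ (ls.takeWhile pvIsItem).map pvConv ++
        "</ol>\n" :: markdown_ol_to_html_alt (ls.dropWhile pvIsItem)) := by
  induction ls with
  | nil => simp [pvGoA, markdown_ol_to_html_alt]
  | cons l rest ih =>
    obtain ⟨ihf, iht⟩ := ih
    by_cases h : pvIsItem l = true
    · have hB : markdown_ol_to_html_alt (l :: rest) =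
          "<ol>\n" :: ((pvConv l :: (rest.takeWhile pvIsItem).map pvConv) ++
            "</ol>\n" :: markdown_ol_to_html_alt (rest.dropWhile pvIsItem)) := by
        rw [markdown_ol_to_html_alt, if_pos h]
      refine ⟨fun acc => ?_, fun acc => ?_⟩
      · rw [pvGoA, if_pos h, if_neg (by simp), iht, hB]; simp
      · rw [pvGoA, if_pos h, if_pos rfl, iht]
        simp [h]
    · have hB : markdown_ol_to_html_alt (l :: rest) = l :: markdown_ol_to_html_alt rest := by
        rw [markdown_ol_to_html_alt, if_neg h]
      refine ⟨fun acc => ?_, fun acc => ?_⟩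
      · rw [pvGoA, if_neg h, if_neg (by simp), ihf, hB]; simp
      · rw [pvGoA, if_neg h, if_pos rfl, ihf]
        simp [h, hB]

-- ===== VERDICT (by name: the statement is the Claim_ definition above) =====
theorem markdown_ol_to_html_spec : Claim_equal_markdown_ol_to_html := by
  intro lines _
  unfold Spec_markdown_ol_to_html markdown_ol_to_html
  simpa using (pvGoA_char lines).1 []
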